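-- pv_equiv track=rewrite | github.com/Huypham07/AutoDocs | back-end/src/domain/rag/graph_rag.py | _format_modules_by_layer
-- ===== SOURCE A (Python) =====
-- from typing import Any
-- from typing import Dict
-- from typing import List
--
-- def _format_modules_by_layer(modules: List[Dict[str, Any]]) -> str:
--     """Format modules grouped by architectural layer."""
--     if not modules:
--         return 'No modules found.'
--
--     # Group by layer
--     by_layer: Dict[str, List[str]] = {}
--     for module in modules:
--         layer = module.get('layer', 'Unknown')
--         if layer not in by_layer:
--             by_layer[layer] = []
--         by_layer[layer].append(module.get('name', 'Unknown'))
--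
--     result = []
--     for layer, module_names in by_layer.items():
--         result.append(f"**{layer}**: {', '.join(module_names)}")
--     return '\n'.join(result)
-- ===== SOURCE B (Python) =====
-- def _format_modules_by_layer(modules):
--     """Format modules grouped by architectural layer."""
--     if not modules:
--         return 'No modules found.'
--
--     # Pass 1: distinct layers in first-appearance order
--     layers = []
--     for module in modules:
--         layer = module.get('layer', 'Unknown')
--         if layer not in layers:
--             layers.append(layer)
--
--     # Pass 2: per-layer re-scan of modules
--     lines = []
--     for layer in layers:
--         names = [m.get('name', 'Unknown') for m in modules
--                  if m.get('layer', 'Unknown') == layer]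
--         lines.append(f"**{layer}**: {', '.join(names)}")
--     return '\n'.join(lines)
-- ===== Notes on version B (the rewrite author's own statement) =====
-- stated objective: alternative
-- what changed: Replaces the single-pass dict-of-lists grouping with a two-pass scheme: first collect the distinct layers in first-appearance order, then re-scan the module list once per layer to gather its names.
import Mathlib
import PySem

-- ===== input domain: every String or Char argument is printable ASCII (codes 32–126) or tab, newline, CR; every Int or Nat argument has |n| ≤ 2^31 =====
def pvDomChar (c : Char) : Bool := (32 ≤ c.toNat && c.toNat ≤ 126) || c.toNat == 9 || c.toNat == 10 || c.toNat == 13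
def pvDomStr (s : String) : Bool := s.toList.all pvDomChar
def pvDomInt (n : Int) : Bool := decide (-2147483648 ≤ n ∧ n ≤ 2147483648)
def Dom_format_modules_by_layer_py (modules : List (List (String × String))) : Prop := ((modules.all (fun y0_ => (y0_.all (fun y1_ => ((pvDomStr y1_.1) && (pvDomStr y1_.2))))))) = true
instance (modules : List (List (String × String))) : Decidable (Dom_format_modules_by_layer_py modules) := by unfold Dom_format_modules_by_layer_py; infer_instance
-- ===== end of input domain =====

-- B replaces A's one-pass dict-of-lists grouping by a two-pass scheme (distinct layers first, then a
-- per-layer re-scan of the modules); same output, no speed claim (objective: alternative).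

-- shared helper: module.get(key, default) on the module's association list (Python dict semantics)
def pyGetStr (m : List (String × String)) (k dflt : String) : String :=
  (PySem.Dict.ofList m).getD k dflt

-- ===== PORT A =====
def format_modules_by_layer_py (modules : List (List (String × String))) : String :=
  if modules = [] then "No modules found."
  else
    let byLayer : PySem.Dict String (List String) :=
      modules.foldl (fun d m =>
        let layer := pyGetStr m "layer" "Unknown"
        let d' := if d.contains layer then d else d.insert layer ([] : List String)
        d'.insert layer (d'.getD layer [] ++ [pyGetStr m "name" "Unknown"])) PySem.Dict.empty
    PySem.Str.join "\n" (byLayer.items.map (fun p =>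
      "**" ++ p.1 ++ "**: " ++ PySem.Str.join ", " p.2))

-- ===== PORT B =====
def format_modules_by_layer_py_alt (modules : List (List (String × String))) : String :=
  if modules = [] then "No modules found."
  else
    let layers : List String :=
      modules.foldl (fun acc m =>
        let l := pyGetStr m "layer" "Unknown"
        if l ∈ acc then acc else acc ++ [l]) []
    PySem.Str.join "\n" (layers.map (fun l =>
      "**" ++ l ++ "**: " ++ PySem.Str.join ", "
        ((modules.filter (fun m => pyGetStr m "layer" "Unknown" == l)).map
          (fun m => pyGetStr m "name" "Unknown"))))

-- ===== PRECONDITION & SPEC =====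
def Spec_format_modules_by_layer_py (modules : List (List (String × String))) (out : String) : Prop := out = format_modules_by_layer_py_alt modules
instance (modules : List (List (String × String))) (out : String) : Decidable (Spec_format_modules_by_layer_py modules out) := by unfold Spec_format_modules_by_layer_py; infer_instance

-- ===== CLAIM (what is proved, stated in full; the proofs are below) =====
def Claim_equal_format_modules_by_layer_py : Prop := ∀ (modules : List (List (String × String))), Dom_format_modules_by_layer_py modules → Spec_format_modules_by_layer_py modules (format_modules_by_layer_py modules)

-- ===== LEMMAS AND PROOFS =====

-- A's loop body is exactly Dict.modify at the layer key
lemma stepA_eq_modify (d : PySem.Dict String (List String)) (m : List (String × String)) :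
    (let layer := pyGetStr m "layer" "Unknown"
     let d' := if d.contains layer then d else d.insert layer ([] : List String)
     d'.insert layer (d'.getD layer [] ++ [pyGetStr m "name" "Unknown"]))
    = d.modify (pyGetStr m "layer" "Unknown") [] (· ++ [pyGetStr m "name" "Unknown"]) := by
  by_cases h : d.contains (pyGetStr m "layer" "Unknown") = true
  · simp only [h, if_pos]
    rfl
  · simp only [Bool.not_eq_true] at h
    simp only [h, Bool.false_eq_true, if_neg, not_false_iff]
    show (d.insert _ []).insert _ ((d.insert _ ([] : List String)).getD _ [] ++ _) = _
    rw [PySem.Dict.getD_insert_self, PySem.Dict.insert_insert_self]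
    show _ = d.insert _ (d.getD _ [] ++ _)
    rw [PySem.Dict.getD_of_not_contains (h := h)]

-- A's dict, characterised: its items are B's layers paired with B's per-layer name lists
lemma byLayer_items (modules : List (List (String × String))) :
    (modules.foldl (fun d m =>
        let layer := pyGetStr m "layer" "Unknown"
        let d' := if d.contains layer then d else d.insert layer ([] : List String)
        d'.insert layer (d'.getD layer [] ++ [pyGetStr m "name" "Unknown"]))
      PySem.Dict.empty).items
    = (PySem.Set.ofList (modules.map (fun m => pyGetStr m "layer" "Unknown"))).map (fun l =>
        (l, (modules.filter (fun m => pyGetStr m "layer" "Unknown" == l)).map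
              (fun m => pyGetStr m "name" "Unknown"))) := by
  have hfold :
      (modules.foldl (fun d m =>
          let layer := pyGetStr m "layer" "Unknown"
          let d' := if d.contains layer then d else d.insert layer ([] : List String)
          d'.insert layer (d'.getD layer [] ++ [pyGetStr m "name" "Unknown"]))
        PySem.Dict.empty)
      = modules.foldl (fun d m =>
          d.modify (pyGetStr m "layer" "Unknown") [] (· ++ [pyGetStr m "name" "Unknown"]))
        PySem.Dict.empty := by
    congr 1
    funext d m
    exact stepA_eq_modify d m
  rw [hfold]
  set D := modules.foldl (fun d m =>
      d.modify (pyGetStr m "layer" "Unknown") [] (· ++ [pyGetStr m "name" "Unknown"]))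
    PySem.Dict.empty with hD
  have hnodup : D.keys.Nodup := by
    rw [hD]
    exact PySem.Dict.nodup_keys_foldl_modify_key modules
      (fun m => pyGetStr m "layer" "Unknown") []
      (fun _ m => (· ++ [pyGetStr m "name" "Unknown"])) PySem.Dict.empty
      PySem.Dict.nodup_keys_empty
  have hkeys : D.keys = PySem.Set.ofList (modules.map (fun m => pyGetStr m "layer" "Unknown")) := by
    rw [hD]
    rw [PySem.Dict.keys_foldl_modify_key modules
      (fun m => pyGetStr m "layer" "Unknown") []
      (fun _ m => (· ++ [pyGetStr m "name" "Unknown"])) PySem.Dict.empty]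
    simp [PySem.Set.update_nil_left]
  have hgetD : ∀ c : String, D.getD c [] =
      (modules.filter (fun m => pyGetStr m "layer" "Unknown" == c)).map
        (fun m => pyGetStr m "name" "Unknown") := by
    intro c
    have hpairs :
        D = (modules.map (fun m => (pyGetStr m "layer" "Unknown", pyGetStr m "name" "Unknown"))).foldl
              (fun d p => d.modify p.1 [] (· ++ [p.2])) PySem.Dict.empty := by
      rw [hD, List.foldl_map]
    rw [hpairs, PySem.Dict.getD_foldl_modify_append, PySem.Dict.getD_empty]
    rw [List.filter_map, List.map_map]
    rfl
  calc D.items = D.keys.map (fun k => (k, D.getD k [])) :=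
        PySem.Dict.items_eq_map_keys D hnodup []
    _ = _ := by
        rw [hkeys]
        exact List.map_congr_left (fun l _ => by rw [hgetD l])

-- B's first pass is set(layers in order)
lemma layers_eq_ofList (modules : List (List (String × String))) :
    (modules.foldl (fun acc m =>
        let l := pyGetStr m "layer" "Unknown"
        if l ∈ acc then acc else acc ++ [l]) [])
    = PySem.Set.ofList (modules.map (fun m => pyGetStr m "layer" "Unknown")) := by
  have h : (fun (acc : List String) (m : List (String × String)) =>
      let l := pyGetStr m "layer" "Unknown"
      if l ∈ acc then acc else acc ++ [l])
      = (fun acc m => PySem.Set.add acc (pyGetStr m "layer" "Unknown")) := by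
    funext acc m
    rw [PySem.Set.add_eq_ite]
  rw [h, ← PySem.Set.update_map_eq_foldl_add, PySem.Set.update_nil_left]

-- ===== VERDICT (by name: the statement is the Claim_ definition above) =====
theorem format_modules_by_layer_py_spec : Claim_equal_format_modules_by_layer_py := by
  intro modules _
  unfold Spec_format_modules_by_layer_py format_modules_by_layer_py format_modules_by_layer_py_alt
  by_cases hm : modules = []
  · simp [hm]
  · simp only [hm, if_neg, not_false_iff]
    rw [byLayer_items modules, layers_eq_ofList modules, List.map_map]
    rfl
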